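-- pv_equiv track=rewrite | github.com/melver/passph | lib/python/passph.py | base_charlist_encode
-- ===== SOURCE A (Python) =====
-- import math
--
-- PAD_CHAR = "$"
--
-- def base_charlist_encode(data, charlist):
--     """
--     Constructs a radix-(2^N) representation of data from charlist, where
--     charlist is of length 2^N. (like base64)
--     """
--     if (len(charlist) & (len(charlist) - 1)) != 0:
--         raise Exception("charlist length is not a power of 2")
--
--     bits_per_digit = int(math.floor(math.log(len(charlist), 2)))
--     cur_bits = 0
--     cur_index = 0
--     indices = []
--     # Note: For Py3k only, bytearray would not be necessary
--     for b in bytearray(data):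
--         remain_bits = 8
--         while remain_bits != 0:
--             use_bits = min(remain_bits, bits_per_digit - cur_bits)
--             use_b = (b >> (remain_bits - use_bits)) & ((2 ** use_bits) - 1)
--             remain_bits -= use_bits
--             cur_bits += use_bits
--             cur_index = cur_index | (use_b << (bits_per_digit - cur_bits))
--
--             if cur_bits == bits_per_digit:
--                 indices.append(cur_index)
--                 cur_bits = 0
--                 cur_index = 0
--
--     result = "".join(charlist[idx] for idx in indices)
--     if cur_bits != 0:
--         result += charlist[cur_index] + (PAD_CHAR * (bits_per_digit - cur_bits))
--
--     return result
-- ===== SOURCE B (Python) =====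
-- import math
--
-- PAD_CHAR = "$"
--
-- def base_charlist_encode(data, charlist):
--     """
--     Radix-(2^N) encoding of data using charlist (len 2^N), like base64.
--     Re-implementation: one big-integer accumulator and closed-form digit
--     extraction instead of per-byte carry splitting.
--     """
--     if (len(charlist) & (len(charlist) - 1)) != 0:
--         raise Exception("charlist length is not a power of 2")
--
--     bits_per_digit = int(math.floor(math.log(len(charlist), 2)))
--     data = bytearray(data)
--     if not data:
--         return ""
--
--     total = int.from_bytes(bytes(data), "big")
--     tbits = 8 * len(data)
--     ndigits, rbits = divmod(tbits, bits_per_digit)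
--     mask = (1 << bits_per_digit) - 1
--
--     out = [charlist[(total >> (tbits - (i + 1) * bits_per_digit)) & mask]
--            for i in range(ndigits)]
--     if rbits:
--         out.append(charlist[(total & ((1 << rbits) - 1)) << (bits_per_digit - rbits)]
--                    + PAD_CHAR * (bits_per_digit - rbits))
--     return "".join(out)
-- ===== Notes on version B (the rewrite author's own statement) =====
-- stated objective: simpler
-- what changed: Replaced the per-byte inner carry-splitting loop (tracking cur_bits/cur_index across bytes) with one big-integer accumulator and closed-form extraction of each digit by shift-and-mask over a range, plus the same left-aligned padded trailing digit.
import Mathlib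
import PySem

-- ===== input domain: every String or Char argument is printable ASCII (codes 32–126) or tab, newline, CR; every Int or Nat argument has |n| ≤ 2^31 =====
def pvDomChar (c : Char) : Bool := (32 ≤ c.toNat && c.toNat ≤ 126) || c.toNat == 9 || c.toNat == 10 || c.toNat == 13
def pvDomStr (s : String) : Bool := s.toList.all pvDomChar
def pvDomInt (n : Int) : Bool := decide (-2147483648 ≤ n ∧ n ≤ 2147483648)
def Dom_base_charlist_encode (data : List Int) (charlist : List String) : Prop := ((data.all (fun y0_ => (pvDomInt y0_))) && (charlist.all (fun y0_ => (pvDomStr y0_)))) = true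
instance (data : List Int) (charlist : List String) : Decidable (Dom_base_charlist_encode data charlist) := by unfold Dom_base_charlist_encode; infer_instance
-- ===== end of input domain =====

-- B bit-packs via one big-integer accumulator with closed-form digit extraction instead of
-- A's per-byte carry-splitting loop; equal return values on Pre_ (inputs where A returns).

-- PAD_CHAR * n  (Python string repetition of "$")
def pvPad (n : Nat) : String := String.ofList (List.replicate n '$')

-- ===== PORT A =====
-- the inner `while remain_bits != 0` loop of A; fuel bounds the iterations (each iteration
-- consumes use_bits ≥ 1 when bits_per_digit ≥ 1, so fuel 9 from remain = 8 is exact; for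
-- bits_per_digit = 0 Python loops forever — Pre_ excludes that).
def innerA (w b : Nat) : Nat → Nat → Nat → Nat → List Nat → Nat × Nat × List Nat
  | 0, _, cb, ci, idxs => (cb, ci, idxs)
  | fuel+1, remain, cb, ci, idxs =>
    if remain = 0 then (cb, ci, idxs)
    else
      let use := min remain (w - cb)
      let use_b := (b >>> (remain - use)) &&& (2 ^ use - 1)
      let remain' := remain - use
      let cb' := cb + use
      let ci' := ci ||| (use_b <<< (w - cb'))
      if cb' = w then innerA w b fuel remain' 0 0 (idxs ++ [ci'])
      else innerA w b fuel remain' cb' ci' idxs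

def base_charlist_encode (data : List Int) (charlist : List String) : String :=
  let L := charlist.length
  -- Python: nonneg L, so `L & (L-1)` is Nat.land; at L = 0 Python computes 0 & -1 = 0 = 0 &&& 0
  if L &&& (L - 1) ≠ 0 then ""      -- Python raises Exception here; Pre_ excludes
  else if L = 0 then ""             -- math.log(0, 2) raises ValueError; Pre_ excludes
  else
    let w := Nat.log2 L             -- int(math.floor(math.log(L, 2))): exact for the power-of-two L Pre_ admits
    -- b.toNat: bytearray(data) raises ValueError unless 0 ≤ b < 256; Pre_ ensures that, so toNat is exact
    let st := data.foldl (fun (st : Nat × Nat × List Nat) b =>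
        innerA w b.toNat 9 8 st.1 st.2.1 st.2.2) (0, 0, ([] : List Nat))
    let result := String.join (st.2.2.map (fun idx => charlist.getD idx ""))
    if st.1 ≠ 0 then result ++ charlist.getD st.2.1 "" ++ pvPad (w - st.1) else result

-- ===== PORT B =====
def base_charlist_encode_alt (data : List Int) (charlist : List String) : String :=
  let L := charlist.length
  if L &&& (L - 1) ≠ 0 then ""      -- Python raises Exception here; Pre_ excludes
  else if L = 0 then ""             -- math.log(0, 2) raises ValueError; Pre_ excludes
  else
    let w := Nat.log2 L             -- as in port A: exact for power-of-two L
    if data = [] then ""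
    else
      -- int.from_bytes(data, "big"); b.toNat exact under Pre_ (bytearray raises otherwise)
      let total := data.foldl (fun acc b => acc * 256 + b.toNat) 0
      let tbits := 8 * data.length
      -- Python divmod(tbits, w) raises ZeroDivisionError at w = 0 (nonempty data); Pre_ excludes
      let ndigits := tbits / w
      let rbits := tbits % w
      let out := (List.range ndigits).map
          (fun i => charlist.getD (total / 2 ^ (tbits - (i+1)*w) &&& (2 ^ w - 1)) "")
      let out := if rbits ≠ 0
        then out ++ [charlist.getD ((total &&& (2 ^ rbits - 1)) <<< (w - rbits)) "" ++ pvPad (w - rbits)]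
        else out
      String.join out

-- ===== PRECONDITION & SPEC =====
-- Pre_ = exactly the inputs where Python A returns: charlist length a power of two (A raises
-- otherwise; length 0 raises ValueError in math.log), every byte in [0,256) (bytearray raises
-- otherwise), and for length-1 charlists (bits_per_digit = 0) only empty data (A loops forever
-- on nonempty data there).
def Pre_base_charlist_encode (data : List Int) (charlist : List String) : Prop :=
  charlist.length ≠ 0 ∧ charlist.length &&& (charlist.length - 1) = 0 ∧
  (charlist.length = 1 → data = []) ∧ ∀ b ∈ data, 0 ≤ b ∧ b < 256
instance (data : List Int) (charlist : List String) : Decidable (Pre_base_charlist_encode data charlist) := by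
  unfold Pre_base_charlist_encode; infer_instance

def pvWitness_base_charlist_encode : List Int × List String := ([7, 250], ["0", "1"])

def Spec_base_charlist_encode (data : List Int) (charlist : List String) (out : String) : Prop := out = base_charlist_encode_alt data charlist
instance (data : List Int) (charlist : List String) (out : String) : Decidable (Spec_base_charlist_encode data charlist out) := by unfold Spec_base_charlist_encode; infer_instance

-- ===== CLAIM (what is proved, stated in full; the proofs are below) =====
def Claim_equal_base_charlist_encode : Prop := ∀ (data : List Int) (charlist : List String), Dom_base_charlist_encode data charlist → Pre_base_charlist_encode data charlist → Spec_base_charlist_encode data charlist (base_charlist_encode data charlist)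

-- ===== LEMMAS AND PROOFS =====

-- the digits emitted after consuming t bits whose big-endian value is Q (w bits per digit)
def pvDigits (w Q t : Nat) : List Nat :=
  (List.range (t / w)).map (fun i => Q / 2 ^ (t - (i+1)*w) % 2 ^ w)

-- A's loop state after consuming t bits of value Q
def pvState (w Q t : Nat) : Nat × Nat × List Nat :=
  (t % w, (Q % 2 ^ (t % w)) * 2 ^ (w - t % w), pvDigits w Q t)

lemma pv_lor_disjoint {m a b : Nat} (ha : 2 ^ m ∣ a) (hb : b < 2 ^ m) : a ||| b = a + b := by
  obtain ⟨k, rfl⟩ := ha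
  apply Nat.eq_of_testBit_eq
  intro j
  rw [Nat.testBit_lor, Nat.testBit_two_pow_mul_add k hb, Nat.testBit_two_pow_mul]
  by_cases hj : j < m
  · simp [hj, Nat.not_le.mpr hj]
  · have hbj : b.testBit j = false :=
      Nat.testBit_lt_two_pow (lt_of_lt_of_le hb (Nat.pow_le_pow_right (by norm_num) (Nat.le_of_not_lt hj)))
    simp [hj, hbj, Nat.le_of_not_lt hj]

lemma pv_chunk_div {Q c u s : Nat} (hc : c < 2 ^ u) : (Q * 2 ^ u + c) / 2 ^ (u + s) = Q / 2 ^ s := by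
  rw [pow_add, ← Nat.div_div_eq_div_mul]
  congr 1
  rw [mul_comm Q, Nat.mul_add_div (Nat.two_pow_pos u), Nat.div_eq_of_lt hc, add_zero]

lemma pv_mod_concat {Q c n u : Nat} (hc : c < 2 ^ u) :
    (Q * 2 ^ u + c) % 2 ^ (n + u) = (Q % 2 ^ n) * 2 ^ u + c := by
  rw [pow_add, mul_comm (2 ^ n) (2 ^ u), Nat.mod_mul, mul_comm Q, Nat.mul_add_mod,
    Nat.mul_add_div (Nat.two_pow_pos u), Nat.div_eq_of_lt hc, add_zero,
    Nat.mod_eq_of_lt hc]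
  ring

lemma pv_digit_bound {i w t : Nat} (hi : i < t / w) : (i+1)*w ≤ t :=
  le_trans (Nat.mul_le_mul_right w hi) (Nat.div_mul_le_self t w)

lemma pvDigits_extend_lt {w Q t u c : Nat} (hc : c < 2 ^ u) (h : t % w + u < w) :
    pvDigits w (Q * 2 ^ u + c) (t + u) = pvDigits w Q t := by
  have hw : 0 < w := by omega
  have hdm := Nat.div_add_mod t w
  have hdiv : (t + u) / w = t / w := by
    have : t + u = w * (t / w) + (t % w + u) := by omega
    rw [this, Nat.mul_add_div hw, Nat.div_eq_of_lt h, add_zero]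
  unfold pvDigits
  rw [hdiv]
  apply List.map_congr_left
  intro i hi
  have hle : (i+1)*w ≤ t := pv_digit_bound (List.mem_range.mp hi)
  have he : t + u - (i+1)*w = u + (t - (i+1)*w) := by omega
  rw [he, pv_chunk_div hc]

lemma pvDigits_extend_emit {w Q t u c : Nat} (hw : 0 < w) (hc : c < 2 ^ u) (h : t % w + u = w) :
    pvDigits w (Q * 2 ^ u + c) (t + u) = pvDigits w Q t ++ [(Q * 2 ^ u + c) % 2 ^ w] := by
  have hdm := Nat.div_add_mod t w
  have hsum : t + u = w * (t / w + 1) := by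
    have : w * (t / w + 1) = w * (t / w) + w := by ring
    omega
  have hdiv : (t + u) / w = t / w + 1 := by
    rw [hsum, Nat.mul_div_cancel_left _ hw]
  unfold pvDigits
  rw [hdiv, List.range_succ, List.map_append]
  congr 1
  · apply List.map_congr_left
    intro i hi
    have hle : (i+1)*w ≤ t := pv_digit_bound (List.mem_range.mp hi)
    have he : t + u - (i+1)*w = u + (t - (i+1)*w) := by omega
    rw [he, pv_chunk_div hc]
  · have he : t + u - (t / w + 1)*w = 0 := by
      have : (t / w + 1)*w = w * (t / w) + w := by ring
      omega
    simp [he]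

lemma pv_ci_update {w Q n u c : Nat} (hc : c < 2 ^ u) (h : n + u ≤ w) :
    ((Q % 2 ^ n) * 2 ^ (w - n)) ||| (c <<< (w - (n + u)))
      = ((Q * 2 ^ u + c) % 2 ^ (n + u)) * 2 ^ (w - (n + u)) := by
  rw [Nat.shiftLeft_eq]
  have h1 : u + (w - (n + u)) = w - n := by omega
  have hb : c * 2 ^ (w - (n + u)) < 2 ^ (w - n) := by
    calc c * 2 ^ (w - (n + u)) < 2 ^ u * 2 ^ (w - (n + u)) :=
          (Nat.mul_lt_mul_right (Nat.two_pow_pos _)).mpr hc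
      _ = 2 ^ (w - n) := by rw [← pow_add, h1]
  rw [pv_lor_disjoint (dvd_mul_left _ _) hb, pv_mod_concat hc, add_mul, mul_assoc,
    ← pow_add, h1]

lemma pv_byte_split {b u r : Nat} : (b / 2 ^ r % 2 ^ u) * 2 ^ r + b % 2 ^ r = b % 2 ^ (u + r) := by
  rw [pow_add, mul_comm (2 ^ u) (2 ^ r), Nat.mod_mul]
  ring

lemma innerA_spec (w : Nat) (hw : 1 ≤ w) :
    ∀ fuel remain, remain < fuel → ∀ b Q t,
    innerA w b fuel remain (pvState w Q t).1 (pvState w Q t).2.1 (pvState w Q t).2.2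
      = pvState w (Q * 2 ^ remain + b % 2 ^ remain) (t + remain) := by
  intro fuel
  induction fuel with
  | zero => intro remain h; omega
  | succ fuel ih =>
    intro remain hlt b Q t
    by_cases h0 : remain = 0
    · subst h0
      simp [innerA, pvState, Nat.mod_one]
    · have hcb : t % w < w := Nat.mod_lt t (by omega)
      have hdm := Nat.div_add_mod t w
      set use := min remain (w - t % w) with huse
      have huse1 : 1 ≤ use := by omega
      have husele : t % w + use ≤ w := by omega
      set r' := remain - use with hr'
      have hr'lt : r' < fuel := by omega
      set c := b / 2 ^ r' % 2 ^ use with hcdef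
      have hclt : c < 2 ^ use := Nat.mod_lt _ (Nat.two_pow_pos use)
      have hub : (b >>> (remain - use)) &&& (2 ^ use - 1) = c := by
        rw [Nat.shiftRight_eq_div_pow, Nat.and_two_pow_sub_one_eq_mod, hcdef, hr']
      have hci : (Q % 2 ^ (t % w)) * 2 ^ (w - t % w) ||| (c <<< (w - (t % w + use)))
          = ((Q * 2 ^ use + c) % 2 ^ (t % w + use)) * 2 ^ (w - (t % w + use)) :=
        pv_ci_update hclt husele
      have hQ' : (Q * 2 ^ use + c) * 2 ^ r' + b % 2 ^ r' = Q * 2 ^ remain + b % 2 ^ remain := by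
        have hru : use + r' = remain := by omega
        rw [add_mul, mul_assoc, ← pow_add, hru, add_assoc, hcdef, pv_byte_split, hru]
      have hts : t + use + r' = t + remain := by omega
      by_cases hemit : t % w + use = w
      · -- the digit fills up: append and reset
        have hmod0 : (t + use) % w = 0 := by
          have h2 : t + use = w * (t / w + 1) := by
            have h3 : w * (t / w + 1) = w * (t / w) + w := by ring
            omega
          rw [h2, Nat.mul_mod_right]
        calc innerA w b (fuel+1) remain (pvState w Q t).1 (pvState w Q t).2.1 (pvState w Q t).2.2
            = innerA w b fuel r' 0 0 (pvDigits w Q t ++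
                [((Q * 2 ^ use + c) % 2 ^ (t % w + use)) * 2 ^ (w - (t % w + use))]) := by
              simp only [innerA, pvState]
              rw [if_neg h0, hub, hci, if_pos hemit]
          _ = innerA w b fuel r' (pvState w (Q * 2 ^ use + c) (t + use)).1
                (pvState w (Q * 2 ^ use + c) (t + use)).2.1
                (pvState w (Q * 2 ^ use + c) (t + use)).2.2 := by
              simp only [pvState, hmod0, Nat.mod_one, Nat.sub_zero, Nat.zero_mul, pow_zero]
              rw [hemit, Nat.sub_self, pow_zero, mul_one,
                pvDigits_extend_emit (by omega) hclt hemit]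
          _ = pvState w ((Q * 2 ^ use + c) * 2 ^ r' + b % 2 ^ r') (t + use + r') :=
              ih r' hr'lt b _ _
          _ = pvState w (Q * 2 ^ remain + b % 2 ^ remain) (t + remain) := by rw [hQ', hts]
      · -- partial digit: keep accumulating
        have hltw : t % w + use < w := by omega
        have hmod : (t + use) % w = t % w + use := by
          have h2 : t + use = w * (t / w) + (t % w + use) := by omega
          rw [h2, Nat.mul_add_mod, Nat.mod_eq_of_lt hltw]
        calc innerA w b (fuel+1) remain (pvState w Q t).1 (pvState w Q t).2.1 (pvState w Q t).2.2
            = innerA w b fuel r' (t % w + use)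
                (((Q * 2 ^ use + c) % 2 ^ (t % w + use)) * 2 ^ (w - (t % w + use)))
                (pvDigits w Q t) := by
              simp only [innerA, pvState]
              rw [if_neg h0, hub, hci, if_neg hemit]
          _ = innerA w b fuel r' (pvState w (Q * 2 ^ use + c) (t + use)).1
                (pvState w (Q * 2 ^ use + c) (t + use)).2.1
                (pvState w (Q * 2 ^ use + c) (t + use)).2.2 := by
              simp only [pvState, hmod]
              rw [pvDigits_extend_lt hclt hltw]
          _ = pvState w ((Q * 2 ^ use + c) * 2 ^ r' + b % 2 ^ r') (t + use + r') :=
              ih r' hr'lt b _ _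
          _ = pvState w (Q * 2 ^ remain + b % 2 ^ remain) (t + remain) := by rw [hQ', hts]

lemma pvState_zero (w : Nat) : pvState w 0 0 = (0, 0, []) := by
  simp [pvState, pvDigits]

lemma foldA_spec (w : Nat) (hw : 1 ≤ w) :
    ∀ (ds : List Int) (Q t : Nat), (∀ b ∈ ds, 0 ≤ b ∧ b < 256) →
    ds.foldl (fun (st : Nat × Nat × List Nat) b => innerA w b.toNat 9 8 st.1 st.2.1 st.2.2) (pvState w Q t)
      = pvState w (ds.foldl (fun a b => a * 256 + b.toNat) Q) (t + 8 * ds.length) := by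
  intro ds
  induction ds with
  | nil => intro Q t _; simp
  | cons b ds ih =>
    intro Q t hb
    have hb0 : 0 ≤ b ∧ b < 256 := hb b (by simp)
    have hbn : b.toNat % 2 ^ 8 = b.toNat := Nat.mod_eq_of_lt (by omega)
    simp only [List.foldl_cons]
    rw [innerA_spec w hw 9 8 (by omega) b.toNat Q t, hbn]
    rw [ih _ _ (fun x hx => hb x (by simp [hx]))]
    norm_num
    congr 1
    omega

lemma pv_join_append (xs : List String) (s : String) :
    String.join (xs ++ [s]) = String.join xs ++ s := by
  simp [String.join, List.foldl_append]

theorem base_charlist_encode_spec : Claim_equal_base_charlist_encode := by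
  intro data charlist _ hpre
  obtain ⟨hL0, hland, hL1, hbytes⟩ := hpre
  unfold Spec_base_charlist_encode base_charlist_encode base_charlist_encode_alt
  conv_lhs => rw [if_neg (by simp [hland] : ¬ (charlist.length &&& (charlist.length - 1) ≠ 0)), if_neg hL0]
  conv_rhs => rw [if_neg (by simp [hland] : ¬ (charlist.length &&& (charlist.length - 1) ≠ 0)), if_neg hL0]
  by_cases hone : charlist.length = 1
  · have hd : data = [] := hL1 hone
    subst hd
    simp [String.join]
  · have hw : 1 ≤ Nat.log2 charlist.length := by
      rw [Nat.le_log2 hL0]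
      have : charlist.length ≠ 0 := hL0
      omega
    set w := Nat.log2 charlist.length with hwdef
    by_cases hdata : data = []
    · subst hdata
      simp [String.join]
    · rw [if_neg hdata]
      have hfold := foldA_spec w hw data 0 0 hbytes
      rw [pvState_zero w] at hfold
      have hout : (List.range (8 * data.length / w)).map
            (fun i => charlist.getD ((data.foldl (fun a b => a * 256 + b.toNat) 0) / 2 ^ (8 * data.length - (i+1)*w) &&& (2 ^ w - 1)) "")
          = (pvDigits w (data.foldl (fun a b => a * 256 + b.toNat) 0) (8 * data.length)).map
              (fun idx => charlist.getD idx "") := by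
        unfold pvDigits
        rw [List.map_map]
        apply List.map_congr_left
        intro i _
        simp [Nat.and_two_pow_sub_one_eq_mod, Function.comp]
      simp only [hfold, pvState, Nat.zero_add]
      by_cases hr : (8 * data.length) % w = 0
      · rw [if_neg (by simp [hr]), if_neg (by simp [hr]), hout]
      · rw [if_pos (by simp [hr]), if_pos (by simp [hr]), hout, pv_join_append,
          Nat.and_two_pow_sub_one_eq_mod, Nat.shiftLeft_eq, String.append_assoc]

-- ===== VERDICT (by name: the statement is the Claim_ definition above) =====
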